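-- pv_equiv track=rewrite | github.com/solkx/code-umie | component/result_m3d.py | muc
-- ===== SOURCE A (Python) =====
-- import itertools
--
-- def muc(predicted_clusters, gold_clusters):
--     """
--         predicted_clusters      list(list)       预测实体簇
--         gold_clusters           list(list)       标注实体簇
--     """
--     pred_edges = set()
--     for cluster in predicted_clusters:
--         pred_edges |= set(itertools.combinations(cluster, 2))
--     gold_edges = set()
--     for cluster in gold_clusters:
--         gold_edges |= set(itertools.combinations(cluster, 2))
--     correct_edges = gold_edges & pred_edges
--     return len(correct_edges), len(pred_edges), len(gold_edges)
-- ===== SOURCE B (Python) =====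
-- import itertools
--
-- def _linked_pairs(clusters):
--     out = []
--     for cluster in clusters:
--         out.extend(itertools.combinations(cluster, 2))
--     return out
--
-- def _n_runs(sorted_pairs):
--     return sum(1 for _ in itertools.groupby(sorted_pairs))
--
-- def muc(predicted_clusters, gold_clusters):
--     pred_pairs = sorted(_linked_pairs(predicted_clusters))
--     gold_pairs = sorted(_linked_pairs(gold_clusters))
--     n_pred = _n_runs(pred_pairs)
--     n_gold = _n_runs(gold_pairs)
--     correct = n_pred + n_gold - _n_runs(sorted(pred_pairs + gold_pairs))
--     return correct, n_pred, n_gold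
-- ===== Notes on version B (the rewrite author's own statement) =====
-- stated objective: alternative
-- what changed: B never builds a set or hash structure: it keeps the in-cluster pair lists with repeats, sorts them, counts distinct pairs as the number of maximal equal runs in the sorted lists, and obtains the correct-edge count by inclusion-exclusion (|P|+|G|-|P union G|) instead of materialising two sets and intersecting them.
import Mathlib
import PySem

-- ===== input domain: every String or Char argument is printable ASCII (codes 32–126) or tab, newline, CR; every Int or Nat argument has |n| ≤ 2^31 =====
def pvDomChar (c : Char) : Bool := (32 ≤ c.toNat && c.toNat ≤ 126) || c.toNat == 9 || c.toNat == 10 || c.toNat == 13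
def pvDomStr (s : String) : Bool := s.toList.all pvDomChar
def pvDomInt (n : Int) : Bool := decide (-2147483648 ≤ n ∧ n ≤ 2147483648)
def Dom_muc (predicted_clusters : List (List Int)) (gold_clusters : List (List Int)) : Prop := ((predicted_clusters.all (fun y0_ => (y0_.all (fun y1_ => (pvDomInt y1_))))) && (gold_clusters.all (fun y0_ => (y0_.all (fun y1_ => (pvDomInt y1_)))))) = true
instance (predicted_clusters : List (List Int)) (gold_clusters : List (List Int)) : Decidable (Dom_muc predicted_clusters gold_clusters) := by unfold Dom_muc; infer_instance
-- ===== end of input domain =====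

-- B computes the three counts without any set/hash structure: it sorts the raw pair lists,
-- counts distinct pairs as boundaries between adjacent runs, and gets the correct-edge
-- count by inclusion-exclusion instead of a set intersection (objective: alternative).

-- ===== PORT A =====
-- itertools.combinations(cluster, 2), tuples as pairs, in itertools order
def combos2 : List Int → List (Int × Int)
  | [] => []
  | x :: xs => xs.map (fun y => (x, y)) ++ combos2 xs

def muc (predicted_clusters : List (List Int)) (gold_clusters : List (List Int)) : List Int :=
  let predEdges := predicted_clusters.foldl
    (fun s c => PySem.Set.union s (combos2 c)) ([] : PySem.Set (Int × Int))
  let goldEdges := gold_clusters.foldl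
    (fun s c => PySem.Set.union s (combos2 c)) ([] : PySem.Set (Int × Int))
  let correctEdges := PySem.Set.inter goldEdges predEdges
  [PySem.Set.len correctEdges, PySem.Set.len predEdges, PySem.Set.len goldEdges]

-- ===== PORT B =====
-- _linked_pairs: 'for cluster in clusters: out.extend(itertools.combinations(cluster, 2))'
def mucPairs (clusters : List (List Int)) : List (Int × Int) :=
  clusters.foldl (fun out cluster => out ++ combos2 cluster) []

-- _n_runs: 'sum(1 for _ in itertools.groupby(sorted_pairs))' — one group per maximal
-- run of equal adjacent elements, so it counts the positions where a new run starts
def mucNRuns : List (Int × Int) → Int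
  | [] => 0
  | [_] => 1
  | x :: y :: t => (if x = y then 0 else 1) + mucNRuns (y :: t)

def muc_alt (predicted_clusters : List (List Int)) (gold_clusters : List (List Int)) : List Int :=
  let predPairs := PySem.List.sorted2 (mucPairs predicted_clusters) (fun p => p.1) (fun p => p.2)
  let goldPairs := PySem.List.sorted2 (mucPairs gold_clusters) (fun p => p.1) (fun p => p.2)
  let nPred := mucNRuns predPairs
  let nGold := mucNRuns goldPairs
  let correct := nPred + nGold -
    mucNRuns (PySem.List.sorted2 (predPairs ++ goldPairs) (fun p => p.1) (fun p => p.2))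
  [correct, nPred, nGold]

-- ===== PRECONDITION & SPEC =====
def Spec_muc (predicted_clusters : List (List Int)) (gold_clusters : List (List Int)) (out : List Int) : Prop := out = muc_alt predicted_clusters gold_clusters
instance (predicted_clusters : List (List Int)) (gold_clusters : List (List Int)) (out : List Int) : Decidable (Spec_muc predicted_clusters gold_clusters out) := by unfold Spec_muc; infer_instance

-- ===== CLAIM (what is proved, stated in full; the proofs are below) =====
def Claim_equal_muc : Prop := ∀ (predicted_clusters : List (List Int)) (gold_clusters : List (List Int)), Dom_muc predicted_clusters gold_clusters → Spec_muc predicted_clusters gold_clusters (muc predicted_clusters gold_clusters)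

-- ===== LEMMAS AND PROOFS =====

-- ----- A's side: the union folds build the set of all in-cluster pairs -----

theorem union_foldl (L : List (List Int)) : ∀ a : List (Int × Int),
    L.foldl (fun s c => PySem.Set.union s (combos2 c)) (PySem.Set.ofList a)
      = PySem.Set.ofList (a ++ L.flatMap combos2) := by
  induction L with
  | nil => intro a; simp
  | cons c cs ih =>
    intro a
    rw [List.foldl_cons, PySem.Set.union, ← PySem.Set.ofList_append, ih,
      List.flatMap_cons, List.append_assoc]

theorem len_ofList (l : List (Int × Int)) :
    PySem.Set.len (PySem.Set.ofList l) = (l.toFinset.card : Int) := by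
  rw [PySem.Set.len, ← List.toFinset_card_of_nodup (PySem.Set.nodup_ofList l)]
  congr 2
  ext p
  simp [PySem.Set.mem_ofList]

theorem len_inter (g p : List (Int × Int)) :
    PySem.Set.len (PySem.Set.inter (PySem.Set.ofList g) (PySem.Set.ofList p))
      = ((g.toFinset ∩ p.toFinset).card : Int) := by
  rw [PySem.Set.len, PySem.Set.inter,
    ← List.toFinset_card_of_nodup ((PySem.Set.nodup_ofList g).filter _)]
  congr 2
  ext q
  simp [PySem.Set.mem_ofList]

-- ----- B's side: mucPairs is the concatenation of the per-cluster pair lists -----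

theorem mucPairs_eq_flatMap (clusters : List (List Int)) :
    mucPairs clusters = clusters.flatMap combos2 := by
  rw [mucPairs]
  simpa using PySem.List.foldl_append_eq_flatMap combos2 clusters []

-- ----- B's side: the run count over the sorted list is the number of distinct pairs -----

-- the strict lexicographic 'before' test that sorted2 inserts with
def pb (a b : Int × Int) : Bool :=
  decide (a.1 < b.1) || (!decide (b.1 < a.1) && decide (a.2 < b.2))

theorem pb_asymm {a b : Int × Int} (h : pb a b = true) : pb b a = false := by
  rcases a with ⟨a1, a2⟩; rcases b with ⟨b1, b2⟩
  simp [pb] at h ⊢; omega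

theorem pb_trans_neg {x y z : Int × Int} (h1 : pb x y = true) (h2 : pb z y = false) :
    pb z x = false := by
  rcases x with ⟨x1, x2⟩; rcases y with ⟨y1, y2⟩; rcases z with ⟨z1, z2⟩
  simp [pb] at h1 h2 ⊢; omega

theorem pb_antisymm {a b : Int × Int} (h1 : pb a b = false) (h2 : pb b a = false) : a = b := by
  rcases a with ⟨a1, a2⟩; rcases b with ⟨b1, b2⟩
  simp [pb] at h1 h2 ⊢; omega

theorem insertBy_pb_pairwise (x : Int × Int) : ∀ l : List (Int × Int),
    l.Pairwise (fun a b => pb b a = false) →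
    (PySem.List.insertBy pb x l).Pairwise (fun a b => pb b a = false) := by
  intro l
  induction l with
  | nil => intro _; simp [PySem.List.insertBy]
  | cons y ys ih =>
    intro hp
    rw [List.pairwise_cons] at hp
    rw [PySem.List.insertBy]
    by_cases hxy : pb x y = true
    · rw [if_pos hxy]
      refine List.Pairwise.cons ?_ (List.Pairwise.cons hp.1 hp.2)
      intro z hz
      rcases List.mem_cons.1 hz with rfl | hz
      · exact pb_asymm hxy
      · exact pb_trans_neg hxy (hp.1 z hz)
    · rw [if_neg hxy]
      refine List.Pairwise.cons ?_ (ih hp.2)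
      intro z hz
      rcases (PySem.List.mem_insertBy pb x z ys).1 hz with rfl | hz
      · simpa using hxy
      · exact hp.1 z hz

theorem sorted2_pb_pairwise (l : List (Int × Int)) :
    (PySem.List.sorted2 l (fun p => p.1) (fun p => p.2)).Pairwise
      (fun a b => pb b a = false) := by
  have key : ∀ (l : List (Int × Int)) (acc : List (Int × Int)),
      acc.Pairwise (fun a b => pb b a = false) →
      (l.foldl (fun acc x => PySem.List.insertBy pb x acc) acc).Pairwise
        (fun a b => pb b a = false) := by
    intro l
    induction l with
    | nil => intro acc h; simpa using h
    | cons x xs ih =>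
      intro acc h
      exact ih _ (insertBy_pb_pairwise x acc h)
  have : PySem.List.sorted2 l (fun p => p.1) (fun p => p.2)
      = l.foldl (fun acc x => PySem.List.insertBy pb x acc) [] := rfl
  rw [this]
  exact key l [] (by simp)

theorem nRuns_eq_card : ∀ s : List (Int × Int),
    s.Pairwise (fun a b => pb b a = false) → mucNRuns s = (s.toFinset.card : Int) := by
  intro s
  induction s with
  | nil => intro _; simp [mucNRuns]
  | cons x xs ih =>
    intro hs
    rw [List.pairwise_cons] at hs
    rcases xs with _ | ⟨y, t⟩
    · simp [mucNRuns]
    · rw [mucNRuns, ih hs.2]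
      by_cases hxy : x = y
      · subst hxy
        have : (x :: x :: t).toFinset = (x :: t).toFinset := by simp
        rw [this]; simp
      · have hxnot : x ∉ (y :: t).toFinset := by
          rw [List.mem_toFinset]
          intro hmem
          rcases List.mem_cons.1 hmem with rfl | hmem
          · exact hxy rfl
          · rw [List.pairwise_cons] at hs
            exact hxy (pb_antisymm (hs.2.1 x hmem) (hs.1 y (by simp)))
        have hcard : ((x :: y :: t).toFinset).card = ((y :: t).toFinset).card + 1 := by
          rw [List.toFinset_cons]
          exact Finset.card_insert_of_notMem hxnot
        rw [if_neg hxy, hcard]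
        push_cast; omega

theorem sorted2_toFinset (l : List (Int × Int)) :
    (PySem.List.sorted2 l (fun p => p.1) (fun p => p.2)).toFinset = l.toFinset :=
  List.toFinset_eq_of_perm _ _ (PySem.List.sorted2_perm l (fun p => p.1) (fun p => p.2) false)

theorem nDistinct_sorted2 (l : List (Int × Int)) :
    mucNRuns (PySem.List.sorted2 l (fun p => p.1) (fun p => p.2)) = (l.toFinset.card : Int) := by
  rw [nRuns_eq_card _ (sorted2_pb_pairwise l), sorted2_toFinset]

-- ===== VERDICT (by name: the statement is the Claim_ definition above) =====
theorem muc_spec : Claim_equal_muc := by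
  intro pred gold _hdom
  rw [Spec_muc, muc, muc_alt]
  have hA1 : pred.foldl (fun s c => PySem.Set.union s (combos2 c))
      ([] : PySem.Set (Int × Int)) = PySem.Set.ofList (pred.flatMap combos2) := by
    simpa using union_foldl pred []
  have hA2 : gold.foldl (fun s c => PySem.Set.union s (combos2 c))
      ([] : PySem.Set (Int × Int)) = PySem.Set.ofList (gold.flatMap combos2) := by
    simpa using union_foldl gold []
  rw [hA1, hA2, len_inter, len_ofList, len_ofList]
  rw [mucPairs_eq_flatMap, mucPairs_eq_flatMap, nDistinct_sorted2, nDistinct_sorted2]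
  have hcat : (PySem.List.sorted2 (pred.flatMap combos2) (fun p => p.1) (fun p => p.2) ++
      PySem.List.sorted2 (gold.flatMap combos2) (fun p => p.1) (fun p => p.2)).toFinset
      = (pred.flatMap combos2).toFinset ∪ (gold.flatMap combos2).toFinset := by
    rw [List.toFinset_append, sorted2_toFinset, sorted2_toFinset]
  rw [nDistinct_sorted2, hcat]
  have hcard := Finset.card_union_add_card_inter
    (pred.flatMap combos2).toFinset (gold.flatMap combos2).toFinset
  rw [Finset.inter_comm ((gold.flatMap combos2).toFinset) ((pred.flatMap combos2).toFinset)]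
  congr 1
  omega
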